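-- pv_equiv track=rewrite | github.com/BenLangmead/qtip-experiments | src/eval/multi_aligner.py | preprocess_tiers
-- ===== SOURCE A (Python) =====
-- def preprocess_tiers(tiers):
--     better_tiers, equal_tiers = [], []
--     for i in range(len(tiers)):
--         better_tier = []
--         equal_tier = []
--         for j in range(len(tiers)):
--             if tiers[j] < tiers[i]:
--                 better_tier.append(j)
--             elif tiers[j] == tiers[i]:
--                 equal_tier.append(j)
--         better_tiers.append(better_tier)
--         equal_tiers.append(equal_tier)
--     return better_tiers, equal_tiers
-- ===== SOURCE B (Python) =====
-- def preprocess_tiers(tiers):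
--     # group indices by tier value, then sweep distinct values in ascending order
--     groups = {}
--     for j in range(len(tiers)):
--         t = tiers[j]
--         groups[t] = groups.get(t, []) + [j]
--     result = {}
--     acc = []
--     for v in sorted(groups):
--         result[v] = (sorted(acc), groups[v])
--         acc = acc + groups[v]
--     better_tiers = [result[t][0] for t in tiers]
--     equal_tiers = [result[t][1] for t in tiers]
--     return better_tiers, equal_tiers
-- ===== Notes on version B (the rewrite author's own statement) =====
-- stated objective: alternative
-- what changed: Replaces A's n independent nested scans with a single group-by-value pass (dict value -> ascending index list), one sweep over the distinct values in ascending order that builds each value's better/equal lists once and shares them across all occurrences of that value, then a final map from each tier to its precomputed pair.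
import Mathlib
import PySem

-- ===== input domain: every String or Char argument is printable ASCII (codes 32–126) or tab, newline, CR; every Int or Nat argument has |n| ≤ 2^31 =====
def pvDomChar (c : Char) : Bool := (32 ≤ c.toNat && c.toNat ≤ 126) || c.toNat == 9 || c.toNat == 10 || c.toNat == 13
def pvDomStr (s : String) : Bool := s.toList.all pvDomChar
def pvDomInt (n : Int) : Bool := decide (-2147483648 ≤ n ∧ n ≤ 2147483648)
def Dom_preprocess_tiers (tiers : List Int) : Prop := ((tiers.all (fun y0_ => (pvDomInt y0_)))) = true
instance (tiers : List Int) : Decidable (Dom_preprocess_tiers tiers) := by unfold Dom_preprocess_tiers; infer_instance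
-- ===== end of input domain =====

-- B groups indices by tier value once and sweeps the distinct values in ascending
-- order, sharing each value's better/equal lists, instead of A's n nested scans
-- (objective: alternative algorithm; equal return values proved below).

-- ===== PORT A =====
def preprocess_tiers (tiers : List Int) : List (List Int) × List (List Int) :=
  let n : Int := PySem.List.len tiers
  (PySem.List.pyRange 0 n).foldl
    (fun st i =>
      let inner := (PySem.List.pyRange 0 n).foldl
        (fun be j =>
          if PySem.List.pyGetD tiers j 0 < PySem.List.pyGetD tiers i 0 then (be.1 ++ [j], be.2)
          else if PySem.List.pyGetD tiers j 0 == PySem.List.pyGetD tiers i 0 then (be.1, be.2 ++ [j])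
          else be)
        (([] : List Int), ([] : List Int))
      (st.1 ++ [inner.1], st.2 ++ [inner.2]))
    (([] : List (List Int)), ([] : List (List Int)))

-- ===== PORT B =====
def preprocess_tiers_alt (tiers : List Int) : List (List Int) × List (List Int) :=
  let groups : PySem.Dict Int (List Int) :=
    (PySem.List.pyRange 0 (PySem.List.len tiers)).foldl
      (fun d j => d.modify (PySem.List.pyGetD tiers j 0) [] (fun cur => cur ++ [j]))
      PySem.Dict.empty
  let st := (PySem.List.sorted groups.keys id).foldl
      (fun st v =>
        (st.1.insert v (PySem.List.sorted st.2 id, groups.getD v []), st.2 ++ groups.getD v []))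
      ((PySem.Dict.empty : PySem.Dict Int (List Int × List Int)), ([] : List Int))
  (tiers.map (fun t => (st.1.getD t ([], [])).1),
   tiers.map (fun t => (st.1.getD t ([], [])).2))

-- ===== PRECONDITION & SPEC =====
def Spec_preprocess_tiers (tiers : List Int) (out : List (List Int) × List (List Int)) : Prop := out = preprocess_tiers_alt tiers
instance (tiers : List Int) (out : List (List Int) × List (List Int)) : Decidable (Spec_preprocess_tiers tiers out) := by unfold Spec_preprocess_tiers; infer_instance

-- ===== CLAIM (what is proved, stated in full; the proofs are below) =====
def Claim_equal_preprocess_tiers : Prop := ∀ (tiers : List Int), Dom_preprocess_tiers tiers → Spec_preprocess_tiers tiers (preprocess_tiers tiers)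

-- ===== LEMMAS AND PROOFS =====

-- indices j of tiers (as Python ints) whose value is < v (resp. == v), ascending
def ltF (t : List Int) (v : Int) : List Int :=
  (PySem.List.pyRange 0 (PySem.List.len t)).filter (fun j => decide (PySem.List.pyGetD t j 0 < v))
def eqF (t : List Int) (v : Int) : List Int :=
  (PySem.List.pyRange 0 (PySem.List.len t)).filter (fun j => PySem.List.pyGetD t j 0 == v)

lemma len_eq_natCast (t : List Int) : PySem.List.len t = ((t.length : Nat) : Int) := rfl

lemma pyRange_pairwise_lt (t : List Int) :
    List.Pairwise (· < ·) (PySem.List.pyRange 0 (PySem.List.len t)) := by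
  rw [len_eq_natCast, PySem.List.pyRange_zero_natCast]
  exact (List.pairwise_lt_range).map _ (by intro a b h; exact_mod_cast h)

lemma mem_pyRange_getD_mem (t : List Int) (j : Int)
    (hj : j ∈ PySem.List.pyRange 0 (PySem.List.len t)) :
    PySem.List.pyGetD t j 0 ∈ t := by
  have h0 : 0 ≤ j ∧ j < (t.length : Int) := by
    simpa [PySem.List.mem_pyRange_one, len_eq_natCast] using hj
  have hjk : j = ((j.toNat : Nat) : Int) := (Int.toNat_of_nonneg h0.1).symm
  have hk : j.toNat < t.length := by omega
  rw [hjk, PySem.List.pyGetD_natCast, List.getD_eq_getElem _ _ hk]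
  exact List.getElem_mem hk

-- A's inner loop: appends into the pair of accumulators = the two filters
lemma inner_char (t : List Int) (v : Int) (l : List Int) (b e : List Int) :
    l.foldl
      (fun be j =>
        if PySem.List.pyGetD t j 0 < v then (be.1 ++ [j], be.2)
        else if PySem.List.pyGetD t j 0 == v then (be.1, be.2 ++ [j])
        else be) (b, e)
    = (b ++ l.filter (fun j => decide (PySem.List.pyGetD t j 0 < v)),
       e ++ l.filter (fun j => PySem.List.pyGetD t j 0 == v)) := by
  induction l generalizing b e with
  | nil => simp
  | cons x xs ih =>
    simp only [List.foldl_cons]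
    by_cases h1 : PySem.List.pyGetD t x 0 < v
    · rw [if_pos h1, ih]
      have h2 : (PySem.List.pyGetD t x 0 == v) = false := by
        simp [ne_of_lt h1]
      simp [h1, h2]
    · rw [if_neg h1]
      by_cases h2 : PySem.List.pyGetD t x 0 = v
      · rw [if_pos (by simp [h2]), ih]
        simp [h2]
      · rw [if_neg (by simp [h2]), ih]
        simp [h1, h2]

-- A's outer loop: appending singletons = map
lemma outer_char (f g : Int → List Int) (l : List Int) (B E : List (List Int)) :
    l.foldl (fun st i => (st.1 ++ [f i], st.2 ++ [g i])) (B, E)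
      = (B ++ l.map f, E ++ l.map g) := by
  induction l generalizing B E with
  | nil => simp
  | cons x xs ih => simp [ih]

lemma A_char (t : List Int) :
    preprocess_tiers t = (t.map (fun v => ltF t v), t.map (fun v => eqF t v)) := by
  unfold preprocess_tiers
  simp only [inner_char, List.nil_append]
  rw [outer_char
    (fun i => List.filter (fun j => decide (PySem.List.pyGetD t j 0 < PySem.List.pyGetD t i 0)) (PySem.List.pyRange 0 (PySem.List.len t)))
    (fun i => List.filter (fun j => PySem.List.pyGetD t j 0 == PySem.List.pyGetD t i 0) (PySem.List.pyRange 0 (PySem.List.len t)))]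
  simp only [List.nil_append]
  have h := PySem.List.map_pyGetD_pyRange_zero t 0
  rw [Prod.mk.injEq]
  constructor
  · show List.map ((fun v => ltF t v) ∘ (fun i => PySem.List.pyGetD t i 0)) _ = _
    rw [← List.map_map, h]
  · show List.map ((fun v => eqF t v) ∘ (fun i => PySem.List.pyGetD t i 0)) _ = _
    rw [← List.map_map, h]

-- B's grouping dict: lookup is the equal-filter
lemma groups_getD (t : List Int) (v : Int) :
    ((PySem.List.pyRange 0 (PySem.List.len t)).foldl
      (fun d j => d.modify (PySem.List.pyGetD t j 0) [] (fun cur => cur ++ [j]))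
      PySem.Dict.empty).getD v []
    = eqF t v := by
  have hfold :
      (PySem.List.pyRange 0 (PySem.List.len t)).foldl
        (fun d j => d.modify (PySem.List.pyGetD t j 0) [] (fun cur => cur ++ [j]))
        PySem.Dict.empty
      = ((PySem.List.pyRange 0 (PySem.List.len t)).map (fun j => (PySem.List.pyGetD t j 0, j))).foldl
          (fun d p => d.modify p.1 [] (fun cur => cur ++ [p.2])) PySem.Dict.empty := by
    rw [List.foldl_map]
  rw [hfold, PySem.Dict.getD_foldl_modify_append]
  rw [List.filter_map, List.map_map]
  simp [eqF, Function.comp_def]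

lemma groups_keys (t : List Int) :
    ((PySem.List.pyRange 0 (PySem.List.len t)).foldl
      (fun d j => d.modify (PySem.List.pyGetD t j 0) [] (fun cur => cur ++ [j]))
      PySem.Dict.empty).keys
    = PySem.Set.ofList t := by
  rw [PySem.Dict.keys_foldl_modify_key _ (fun j => PySem.List.pyGetD t j 0) []
        (fun _ j => (fun cur => cur ++ [j]))]
  rw [PySem.List.map_pyGetD_pyRange_zero t 0]
  rw [show (PySem.Dict.empty : PySem.Dict Int (List Int)).keys = [] from rfl,
      PySem.Set.update_nil_left]

-- the sweep over sorted distinct values: untouched keys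
lemma loop_get_notmem (g : PySem.Dict Int (List Int)) (ks : List Int)
    (d : PySem.Dict Int (List Int × List Int)) (acc : List Int) (v : Int) (hv : v ∉ ks) :
    ((ks.foldl (fun st k => (st.1.insert k (PySem.List.sorted st.2 id, g.getD k []), st.2 ++ g.getD k [])) (d, acc)).1).getD v ([], [])
    = d.getD v ([], []) := by
  induction ks generalizing d acc with
  | nil => rfl
  | cons k rest ih =>
    simp only [List.mem_cons, not_or] at hv
    simp only [List.foldl_cons]
    rw [ih _ _ hv.2, PySem.Dict.getD_insert_of_ne _ _ _ hv.1]

lemma loop_get (g : PySem.Dict Int (List Int)) (ks : List Int)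
    (d : PySem.Dict Int (List Int × List Int)) (acc : List Int) (v : Int)
    (hnd : ks.Nodup) (hv : v ∈ ks) :
    ((ks.foldl (fun st k => (st.1.insert k (PySem.List.sorted st.2 id, g.getD k []), st.2 ++ g.getD k [])) (d, acc)).1).getD v ([], [])
    = (PySem.List.sorted (acc ++ (ks.takeWhile (fun k => !(k == v))).flatMap (fun k => g.getD k [])) id,
       g.getD v []) := by
  induction ks generalizing d acc with
  | nil => exact absurd hv List.not_mem_nil
  | cons k rest ih =>
    simp only [List.foldl_cons]
    by_cases hk : k = v
    · subst hk
      have hnotin : k ∉ rest := (List.nodup_cons.mp hnd).1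
      rw [loop_get_notmem _ _ _ _ _ hnotin, PySem.Dict.getD_insert_self]
      simp
    · have hv' : v ∈ rest := by
        rcases List.mem_cons.mp hv with h | h
        · exact absurd h.symm hk
        · exact h
      rw [ih _ _ (List.nodup_cons.mp hnd).2 hv']
      have hb : (k == v) = false := by simp [hk]
      simp [hb, List.append_assoc]

-- in a strictly increasing list containing v, the prefix before v = keys < v
lemma tw_filter (ks : List Int) (v : Int) (hp : ks.Pairwise (· < ·)) (hv : v ∈ ks) :
    ks.takeWhile (fun k => !(k == v)) = ks.filter (fun k => decide (k < v)) := by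
  induction ks with
  | nil => rfl
  | cons k rest ih =>
    have hlt : ∀ x ∈ rest, k < x := fun x hx => (List.pairwise_cons.mp hp).1 x hx
    by_cases hk : k = v
    · subst hk
      have h1 : ¬ (k < k) := lt_irrefl k
      have h2 : rest.filter (fun x => decide (x < k)) = [] := by
        apply List.filter_eq_nil_iff.mpr
        intro x hx
        simp [not_lt.mpr (le_of_lt (hlt x hx))]
      simp [h2]
    · have hv' : v ∈ rest := by
        rcases List.mem_cons.mp hv with h | h
        · exact absurd h.symm hk
        · exact h
      have hkv : k < v := hlt v hv'
      have hb : (k == v) = false := by simp [hk]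
      rw [List.takeWhile_cons, List.filter_cons]
      simp only [hb, Bool.not_false, if_true, hkv, decide_true]
      rw [ih (List.pairwise_cons.mp hp).2 hv']

-- disjoint filters split a filtered list up to permutation
lemma filter_or_perm {α : Type} (p q : α → Bool) (h : ∀ x, p x = true → q x = false) (xs : List α) :
    (xs.filter (fun x => p x || q x)).Perm (xs.filter p ++ xs.filter q) := by
  induction xs with
  | nil => simp
  | cons x xs ih =>
    simp only [List.filter_cons]
    cases hp : p x
    · cases hq : q x
      · simpa [hp, hq] using ih
      · simp only [Bool.false_or]
        exact (ih.cons x).trans (List.perm_middle.symm)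
    · simp only [h x hp, Bool.true_or, if_true, List.cons_append]
      exact ih.cons x

-- the equal-groups of a nodup list of values partition membership
lemma partition_perm (t : List Int) (vals : List Int) (hnd : vals.Nodup) :
    (vals.flatMap (fun k => eqF t k)).Perm
      ((PySem.List.pyRange 0 (PySem.List.len t)).filter
        (fun j => decide (PySem.List.pyGetD t j 0 ∈ vals))) := by
  induction vals with
  | nil => simp
  | cons k vs ih =>
    have hk : k ∉ vs := (List.nodup_cons.mp hnd).1
    have hdis : ∀ (j : Int), (PySem.List.pyGetD t j 0 == k) = true →
        (decide (PySem.List.pyGetD t j 0 ∈ vs)) = false := by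
      intro j hj
      rw [beq_iff_eq] at hj
      simp [hj, hk]
    have hsplit := filter_or_perm (fun j => PySem.List.pyGetD t j 0 == k)
      (fun j => decide (PySem.List.pyGetD t j 0 ∈ vs)) hdis
      (PySem.List.pyRange 0 (PySem.List.len t))
    have hpred : (fun (j : Int) => decide (PySem.List.pyGetD t j 0 ∈ k :: vs))
        = fun j => (PySem.List.pyGetD t j 0 == k) || decide (PySem.List.pyGetD t j 0 ∈ vs) := by
      funext j
      rw [Bool.eq_iff_iff]
      simp [List.mem_cons]
    rw [List.flatMap_cons, hpred]
    exact (((ih (List.nodup_cons.mp hnd).2).append_left (eqF t k)).trans hsplit.symm)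

lemma pairwise_lt_of_le_nodup (l : List Int) (h1 : l.Pairwise (· ≤ ·)) (h2 : l.Nodup) :
    l.Pairwise (· < ·) :=
  (h1.and h2).imp (fun h => lt_of_le_of_ne h.1 h.2)

-- the value looked up for each v ∈ tiers is exactly (ltF, eqF)
lemma final_get (t : List Int) (g : PySem.Dict Int (List Int))
    (hg : ∀ w, g.getD w [] = eqF t w) (hkeys : g.keys = PySem.Set.ofList t)
    (v : Int) (hv : v ∈ t) :
    (((PySem.List.sorted g.keys id).foldl
        (fun st k => (st.1.insert k (PySem.List.sorted st.2 id, g.getD k []), st.2 ++ g.getD k []))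
        ((PySem.Dict.empty : PySem.Dict Int (List Int × List Int)), ([] : List Int))).1).getD v ([], [])
      = (ltF t v, eqF t v) := by
  have hperm : (PySem.List.sorted g.keys id).Perm g.keys := PySem.List.sorted_perm _ _ _
  have hknd : g.keys.Nodup := by rw [hkeys]; exact PySem.Set.nodup_ofList t
  have hnodup : (PySem.List.sorted g.keys id).Nodup := hperm.nodup_iff.mpr hknd
  have hle : (PySem.List.sorted g.keys id).Pairwise (· ≤ ·) := by
    have := PySem.List.sorted_pairwise g.keys (id : Int → Int)
    simpa using this
  have hpw : (PySem.List.sorted g.keys id).Pairwise (· < ·) :=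
    pairwise_lt_of_le_nodup _ hle hnodup
  have hvks : v ∈ PySem.List.sorted g.keys id := by
    rw [hperm.mem_iff, hkeys, PySem.Set.mem_ofList]
    exact hv
  rw [loop_get g _ _ _ v hnodup hvks, hg v, tw_filter _ v hpw hvks, List.nil_append]
  have hflat : ((PySem.List.sorted g.keys id).filter (fun k => decide (k < v))).flatMap
      (fun k => g.getD k [])
      = ((PySem.List.sorted g.keys id).filter (fun k => decide (k < v))).flatMap
          (fun k => eqF t k) := by
    simp only [hg]
  rw [hflat, Prod.mk.injEq]
  refine ⟨?_, rfl⟩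
  have hndf : ((PySem.List.sorted g.keys id).filter (fun k => decide (k < v))).Nodup :=
    hnodup.filter _
  have hperm2 := partition_perm t ((PySem.List.sorted g.keys id).filter (fun k => decide (k < v))) hndf
  have hfeq : (PySem.List.pyRange 0 (PySem.List.len t)).filter
      (fun j => decide (PySem.List.pyGetD t j 0 ∈
        (PySem.List.sorted g.keys id).filter (fun k => decide (k < v))))
      = ltF t v := by
    unfold ltF
    apply List.filter_congr
    intro j hj
    have hmem : PySem.List.pyGetD t j 0 ∈ PySem.List.sorted g.keys id := by
      rw [hperm.mem_iff, hkeys, PySem.Set.mem_ofList]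
      exact mem_pyRange_getD_mem t j hj
    simp [List.mem_filter, hmem]
  rw [hfeq] at hperm2
  have hpairlt : (ltF t v).Pairwise (· < ·) := (pyRange_pairwise_lt t).filter _
  exact PySem.List.sorted_eq_of_perm_of_pairwise_lt _ (ltF t v) id hperm2.symm (by simpa using hpairlt)

lemma B_char (t : List Int) :
    preprocess_tiers_alt t = (t.map (fun v => ltF t v), t.map (fun v => eqF t v)) := by
  unfold preprocess_tiers_alt
  rw [Prod.mk.injEq]
  constructor
  · apply List.map_congr_left
    intro v hv
    rw [final_get t _ (groups_getD t) (groups_keys t) v hv]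
  · apply List.map_congr_left
    intro v hv
    rw [final_get t _ (groups_getD t) (groups_keys t) v hv]

-- ===== VERDICT (by name: the statement is the Claim_ definition above) =====
theorem preprocess_tiers_spec : Claim_equal_preprocess_tiers := by
  intro tiers _
  show preprocess_tiers tiers = preprocess_tiers_alt tiers
  rw [A_char, B_char]
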